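-- pv_equiv track=rewrite | github.com/noorsami/fruitvliegen | testJur.py | scoreNeighbours
-- ===== SOURCE A (Python) =====
-- def scoreNeighbours(mel):
--     score = 0
--     length = len(mel)
--     for i in range(1, length - 1):
--         checkLeft = mel[i] - mel[i - 1]
--         checkRight = mel[i] - mel[i + 1]
--         if abs(checkLeft) == 1:
--             score += 1
--         if abs(checkRight) == 1:
--             score += 1
--     return score
-- ===== SOURCE B (Python) =====
-- def scoreNeighbours(mel):
--     flags = [1 if abs(x - y) == 1 else 0 for x, y in zip(mel, mel[1:])]
--     if not flags:
--         return 0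
--     return 2 * sum(flags) - flags[0] - flags[-1]
-- ===== Notes on version B (the rewrite author's own statement) =====
-- stated objective: alternative
-- what changed: Replaced the node-centric loop (two conditionals per interior index) by a global counting identity: each adjacent pair is flagged once via zip, the total flag sum is doubled, and the two boundary flags are subtracted arithmetically, since every interior edge is checked twice by A and each boundary edge once.
import Mathlib
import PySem

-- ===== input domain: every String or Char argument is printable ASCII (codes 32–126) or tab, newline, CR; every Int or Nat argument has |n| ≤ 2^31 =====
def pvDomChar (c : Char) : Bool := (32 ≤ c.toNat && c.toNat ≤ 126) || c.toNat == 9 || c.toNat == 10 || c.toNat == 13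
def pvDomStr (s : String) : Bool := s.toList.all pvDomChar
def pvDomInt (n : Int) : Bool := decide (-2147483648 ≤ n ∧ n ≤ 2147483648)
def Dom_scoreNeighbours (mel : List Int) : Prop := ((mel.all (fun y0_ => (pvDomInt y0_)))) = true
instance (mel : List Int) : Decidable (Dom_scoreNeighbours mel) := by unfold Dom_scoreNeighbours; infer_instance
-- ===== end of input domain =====

-- B replaces A's node-centric loop (two conditionals per interior index) by a global counting
-- identity: flag every adjacent pair once, double the total, subtract the two boundary flags.

-- ===== PORT A =====
def scoreNeighbours (mel : List Int) : Int :=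
  let length : Int := mel.length
  (PySem.List.pyRange 1 (length - 1) 1).foldl
    (fun score i =>
      let checkLeft := PySem.List.pyGetD mel i 0 - PySem.List.pyGetD mel (i - 1) 0
      let checkRight := PySem.List.pyGetD mel i 0 - PySem.List.pyGetD mel (i + 1) 0
      let score := if checkLeft.natAbs = 1 then score + 1 else score
      if checkRight.natAbs = 1 then score + 1 else score) 0

-- ===== PORT B =====
def scoreNeighbours_alt (mel : List Int) : Int :=
  let flags := (mel.zip (PySem.List.slice mel (some 1) none)).map
    (fun xy => if (xy.1 - xy.2).natAbs = 1 then (1 : Int) else 0)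
  if flags = [] then 0
  else 2 * flags.sum - PySem.List.pyGetD flags 0 0 - PySem.List.pyGetD flags (-1) 0

-- ===== PRECONDITION & SPEC =====
def Spec_scoreNeighbours (mel : List Int) (out : Int) : Prop := out = scoreNeighbours_alt mel
instance (mel : List Int) (out : Int) : Decidable (Spec_scoreNeighbours mel out) := by unfold Spec_scoreNeighbours; infer_instance

-- ===== CLAIM (what is proved, stated in full; the proofs are below) =====
def Claim_equal_scoreNeighbours : Prop := ∀ (mel : List Int), Dom_scoreNeighbours mel → Spec_scoreNeighbours mel (scoreNeighbours mel)

-- ===== LEMMAS AND PROOFS =====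

-- edge flag: 1 iff the pair (k, k+1) differs by exactly one
def pvEdge (mel : List Int) (k : Nat) : Int :=
  if (mel.getD k 0 - mel.getD (k + 1) 0).natAbs = 1 then 1 else 0

theorem pvFoldl_step (l : List Nat) (s : Int → Nat → Int) (f : Nat → Int) (init : Int)
    (h : ∀ acc k, s acc k = acc + f k) : l.foldl s init = init + (l.map f).sum := by
  induction l generalizing init with
  | nil => simp
  | cons a t ih => simp [h, ih]; ring

theorem pvA_eq (mel : List Int) :
    scoreNeighbours mel
      = ((List.range (mel.length - 2)).map (fun k => pvEdge mel k + pvEdge mel (k + 1))).sum := by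
  simp only [scoreNeighbours]
  rw [PySem.List.pyRange_one, List.foldl_map,
      show ((mel.length : Int) - 1 - 1).toNat = mel.length - 2 by omega,
      pvFoldl_step _ _ (fun k => pvEdge mel k + pvEdge mel (k + 1)) 0 ?_]
  · ring
  · intro acc k
    simp only []
    have e3 : (1 : Int) + (k : Int) + 1 = ((k + 2 : Nat) : Int) := by push_cast; ring
    have e2 : (1 : Int) + (k : Int) - 1 = ((k : Nat) : Int) := by ring
    have e1 : (1 : Int) + (k : Int) = ((k + 1 : Nat) : Int) := by push_cast; ring
    rw [e3, e2, e1]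
    simp only [PySem.List.pyGetD_natCast, pvEdge]
    rw [show (mel.getD k 0 - mel.getD (k + 1) 0).natAbs
          = (mel.getD (k + 1) 0 - mel.getD k 0).natAbs from by rw [← Int.natAbs_neg, neg_sub],
        show k + 1 + 1 = k + 2 from rfl]
    split_ifs <;> ring

-- B's zip-built flag list is the edge table indexed by range
theorem pvFlags_eq (mel : List Int) :
    (mel.zip (PySem.List.slice mel (some 1) none)).map
        (fun xy => if (xy.1 - xy.2).natAbs = 1 then (1 : Int) else 0)
      = (List.range (mel.length - 1)).map (pvEdge mel) := by
  rw [PySem.List.slice_from_one]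
  apply List.ext_getElem
  · simp [List.length_tail]
  · intro k h1 h2
    have hk : k < mel.length - 1 := by simp at h2; omega
    have hk1 : k + 1 < mel.length := by omega
    simp [List.getElem_zip, List.getElem_tail, pvEdge,
          List.getElem?_eq_getElem (by omega : k < mel.length),
          List.getElem?_eq_getElem hk1]

theorem pvSum_map_add (l : List Nat) (f g : Nat → Int) :
    (l.map (fun k => f k + g k)).sum = (l.map f).sum + (l.map g).sum := by
  induction l with
  | nil => simp
  | cons a t ih => simp [ih]; ring

-- split off the last term of a range-sum
theorem pvSum_last (m : Nat) (e : Nat → Int) (h : 1 ≤ m) :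
    ((List.range m).map e).sum = ((List.range (m - 1)).map e).sum + e (m - 1) := by
  conv_lhs => rw [show m = (m - 1) + 1 by omega, List.range_succ]
  simp

-- split off the first term of a range-sum
theorem pvSum_first (m : Nat) (e : Nat → Int) (h : 1 ≤ m) :
    ((List.range m).map e).sum = e 0 + ((List.range (m - 1)).map (fun k => e (k + 1))).sum := by
  conv_lhs => rw [show m = (m - 1) + 1 by omega, List.range_succ_eq_map]
  simp [List.map_map, Function.comp_def]

theorem scoreNeighbours_spec' (mel : List Int) : scoreNeighbours mel = scoreNeighbours_alt mel := by
  simp only [scoreNeighbours_alt, pvFlags_eq]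
  set m : Nat := mel.length - 1 with hm
  by_cases h0 : m = 0
  · have : mel.length - 2 = 0 := by omega
    simp [pvA_eq, this, h0]
  · have hm1 : 1 ≤ m := by omega
    have hne : (List.range m).map (pvEdge mel) ≠ [] := by
      simp [List.map_eq_nil_iff, List.range_eq_nil]; omega
    rw [if_neg hne, PySem.List.pyGetD_zero, PySem.List.pyGetD_neg_one _ _ hne]
    have hlen : ((List.range m).map (pvEdge mel)).length = m := by simp
    have hget0 : ((List.range m).map (pvEdge mel)).getD 0 0 = pvEdge mel 0 := by
      rw [List.getD_eq_getElem _ 0 (by omega)]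
      simp
    have hgetL : ((List.range m).map (pvEdge mel)).getLast hne = pvEdge mel (m - 1) := by
      rw [List.getLast_eq_getElem]
      simp [hlen]
    rw [hget0, hgetL, pvA_eq, show mel.length - 2 = m - 1 by omega, pvSum_map_add,
        show ((List.range (m-1)).map (fun k => pvEdge mel k)).sum
            = ((List.range m).map (pvEdge mel)).sum - pvEdge mel (m - 1) by
          rw [pvSum_last m (pvEdge mel) hm1]; ring,
        show ((List.range (m-1)).map (fun k => pvEdge mel (k + 1))).sum
            = ((List.range m).map (pvEdge mel)).sum - pvEdge mel 0 by
          rw [pvSum_first m (pvEdge mel) hm1]; ring]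
    ring

-- ===== VERDICT (by name: the statement is the Claim_ definition above) =====
theorem scoreNeighbours_spec : Claim_equal_scoreNeighbours := by
  intro mel _
  unfold Spec_scoreNeighbours
  exact scoreNeighbours_spec' mel
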